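-- pv_equiv track=rewrite | github.com/spacedentist/pywavez | pywavez/serialization/Serialization.py | intsize
-- ===== SOURCE A (Python) =====
-- def intsize(x):
--     x = int(x)
--     size = 1
--     if x < 0:
--         x = -x
--         while x > 128:
--             size += 1
--             x >>= 8
--     else:
--         while x >= 128:
--             size += 1
--             x >>= 8
--     return size
-- ===== SOURCE B (Python) =====
-- def intsize(x):
--     x = int(x)
--     if x < 0:
--         return (-x - 1).bit_length() // 8 + 1
--     return x.bit_length() // 8 + 1
-- ===== Notes on version B (the rewrite author's own statement) =====
-- stated objective: simpler
-- what changed: Replaced both byte-shifting while-loops with a direct closed-form byte count from bit_length (two's-complement size), with no loop at all.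
-- intended difference: For negative x with 32768 < -x < 33024 or 8388608 < -x < 8454144 (within the 2^31 domain), A's '>128' loop returns a size one byte too small (e.g. 2 for x=-32769, which does not fit in 2 signed bytes), while B returns the correct two's-complement size, one more; B's value is the one a serializer needs. — e.g. on intsize(-32769): A returns 2, B returns 3
import Mathlib
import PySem

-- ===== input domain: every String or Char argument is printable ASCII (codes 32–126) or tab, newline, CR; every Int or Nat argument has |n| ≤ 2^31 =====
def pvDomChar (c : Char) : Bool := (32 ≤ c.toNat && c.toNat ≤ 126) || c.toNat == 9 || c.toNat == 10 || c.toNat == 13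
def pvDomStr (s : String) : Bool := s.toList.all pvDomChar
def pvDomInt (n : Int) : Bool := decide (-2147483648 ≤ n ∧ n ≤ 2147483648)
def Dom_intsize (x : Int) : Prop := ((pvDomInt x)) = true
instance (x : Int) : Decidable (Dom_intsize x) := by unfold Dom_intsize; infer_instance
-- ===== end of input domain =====

-- B replaces both byte-shifting loops with a closed-form byte count from bit_length;
-- on a small band of negatives (see D_intsize) A's size is one byte too small and B returns the intended value.

-- ===== PORT A =====
-- while x >= 128: size += 1; x >>= 8   ('x >>= 8' on a non-negative int is floor-division by 256; exact here since
-- x ≥ 0 on entry). The loop is fuel-bounded structural recursion; fuel = x.toNat bounds the iteration count since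
-- x strictly decreases, so the fuel guard never fires on the values the function reaches.
def intsizeLoopPos : Nat → Int → Int → Int
  | 0, _, size => size
  | fuel + 1, x, size =>
    if 128 ≤ x then intsizeLoopPos fuel (PySem.Int.floordiv x 256) (size + 1) else size

-- while x > 128: size += 1; x >>= 8   (x ≥ 0 on entry, after x = -x)
def intsizeLoopNeg : Nat → Int → Int → Int
  | 0, _, size => size
  | fuel + 1, x, size =>
    if 128 < x then intsizeLoopNeg fuel (PySem.Int.floordiv x 256) (size + 1) else size

def intsize (x : Int) : Int :=
  -- x = int(x) is the identity on an int argument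
  if x < 0 then intsizeLoopNeg (-x).toNat (-x) 1 else intsizeLoopPos x.toNat x 1

-- ===== PORT B =====
def intsize_alt (x : Int) : Int :=
  -- x = int(x) is the identity on an int argument
  if x < 0 then ((PySem.Int.bitLength (-x - 1) / 8 : Nat) : Int) + 1
  else ((PySem.Int.bitLength x / 8 : Nat) : Int) + 1

-- ===== PRECONDITION & SPEC =====
-- For negative x with 32768 < -x < 33024 or 8388608 < -x < 8454144 (the bands inside the 2^31 domain just above a
-- two's-complement boundary) A's '>128' loop returns a size one byte too small (e.g. 2 for x = -32769, which does not
-- fit in 2 signed bytes); B returns the correct two's-complement size, one more, which is what a serializer needs.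
def D_intsize (x : Int) : Prop :=
  x < 0 ∧ ((32768 < -x ∧ -x < 33024) ∨ (8388608 < -x ∧ -x < 8454144))
instance (x : Int) : Decidable (D_intsize x) := by unfold D_intsize; infer_instance

def Spec_intsize (x : Int) (out : Int) : Prop := ¬ D_intsize x → out = intsize_alt x
instance (x : Int) (out : Int) : Decidable (Spec_intsize x out) := by unfold Spec_intsize; infer_instance

def pvDiffWitness_intsize : Int := (-32769)
def pvDiffWitnessOut_intsize : Int × Int := (2, 3)

-- ===== CLAIM (what is proved, stated in full; the proofs are below) =====
def Claim_unchanged_intsize : Prop := ∀ (x : Int), Dom_intsize x → Spec_intsize x (intsize x)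
def Claim_changed_intsize : Prop := Dom_intsize (pvDiffWitness_intsize) ∧ D_intsize (pvDiffWitness_intsize) ∧ intsize (pvDiffWitness_intsize) = pvDiffWitnessOut_intsize.1 ∧ intsize_alt (pvDiffWitness_intsize) = pvDiffWitnessOut_intsize.2 ∧ pvDiffWitnessOut_intsize.1 ≠ pvDiffWitnessOut_intsize.2
def Claim_exact_intsize : Prop := ∀ (x : Int), Dom_intsize x → D_intsize x → intsize x ≠ intsize_alt x

-- ===== LEMMAS AND PROOFS =====

-- bit-length brackets (derived from the cited PySem bounds)
lemma bl_le_of_lt {n k : Nat} (h : n < 2 ^ k) : PySem.Int.bitLength (n : Int) ≤ k := by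
  by_cases h0 : n = 0
  · simp [h0, PySem.Int.bitLength_zero]
  · by_contra hlt
    have h1 := PySem.Int.two_pow_bitLength_le (n := (n : Int)) (by exact_mod_cast h0)
    rw [Int.natAbs_natCast] at h1
    have h2 : 2 ^ k ≤ 2 ^ (PySem.Int.bitLength (n : Int) - 1) :=
      Nat.pow_le_pow_right (by norm_num) (by omega)
    omega

lemma lt_bl_of_le {n k : Nat} (h : 2 ^ k ≤ n) : k < PySem.Int.bitLength (n : Int) := by
  have h1 := PySem.Int.lt_two_pow_bitLength (n : Int)
  rw [Int.natAbs_natCast] at h1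
  have h3 : 2 ^ k < 2 ^ PySem.Int.bitLength (n : Int) := by omega
  exact (Nat.pow_lt_pow_iff_right (by norm_num : 1 < 2)).mp h3

-- shifting a byte off drops the bit length by 8 (for n ≥ 128)
lemma bl_div256 {n : Nat} (h : 128 ≤ n) :
    PySem.Int.bitLength ((n / 256 : Nat) : Int) = PySem.Int.bitLength (n : Int) - 8 := by
  have hb8 : 8 ≤ PySem.Int.bitLength (n : Int) := lt_bl_of_le (k := 7) (by omega)
  have hub : n < 2 ^ PySem.Int.bitLength (n : Int) := by
    have h1 := PySem.Int.lt_two_pow_bitLength (n : Int)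
    rwa [Int.natAbs_natCast] at h1
  have hlb : 2 ^ (PySem.Int.bitLength (n : Int) - 1) ≤ n := by
    have h1 := PySem.Int.two_pow_bitLength_le (n := (n : Int))
      (by exact_mod_cast (by omega : n ≠ 0))
    rwa [Int.natAbs_natCast] at h1
  apply Nat.le_antisymm
  · apply bl_le_of_lt
    have hmul : 2 ^ (PySem.Int.bitLength (n : Int) - 8) * 256
        = 2 ^ PySem.Int.bitLength (n : Int) := by
      rw [show (256 : Nat) = 2 ^ 8 from rfl, ← pow_add, Nat.sub_add_cancel hb8]
    exact Nat.div_lt_of_lt_mul (by omega)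
  · rcases Nat.lt_or_ge 8 (PySem.Int.bitLength (n : Int)) with h9 | h9
    · have hmul : 2 ^ (PySem.Int.bitLength (n : Int) - 9) * 256
          = 2 ^ (PySem.Int.bitLength (n : Int) - 1) := by
        rw [show (256 : Nat) = 2 ^ 8 from rfl, ← pow_add]
        congr 1
        omega
      have hdiv : 2 ^ (PySem.Int.bitLength (n : Int) - 9) ≤ n / 256 :=
        (Nat.le_div_iff_mul_le (by norm_num)).mpr (by omega)
      have := lt_bl_of_le hdiv
      omega
    · omega

lemma floordiv_natCast256 (n : Nat) :
    PySem.Int.floordiv (n : Int) 256 = ((n / 256 : Nat) : Int) := by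
  exact_mod_cast PySem.Int.floordiv_natCast n 256

lemma bl_zero_cast : PySem.Int.bitLength ((0 : Nat) : Int) = 0 := by
  rw [Nat.cast_zero]
  exact PySem.Int.bitLength_zero

-- A's non-negative loop computes s + bit_length // 8 (any sufficient fuel)
lemma loopPos_eq : ∀ (fuel : Nat) (n : Nat) (s : Int), n ≤ fuel →
    intsizeLoopPos fuel (n : Int) s = s + ((PySem.Int.bitLength (n : Int) / 8 : Nat) : Int) := by
  intro fuel
  induction fuel with
  | zero =>
    intro n s hn
    rw [show n = 0 by omega, bl_zero_cast]
    simp [intsizeLoopPos]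
  | succ fuel ih =>
    intro n s hn
    rw [intsizeLoopPos]
    by_cases h : 128 ≤ n
    · rw [if_pos (by exact_mod_cast h), floordiv_natCast256,
        ih (n / 256) _ (by omega : n / 256 ≤ fuel), bl_div256 h]
      have h8 : 8 ≤ PySem.Int.bitLength (n : Int) := lt_bl_of_le (k := 7) (by omega)
      omega
    · rw [if_neg (by exact_mod_cast h)]
      have h7 : PySem.Int.bitLength (n : Int) ≤ 7 := bl_le_of_lt (k := 7) (by omega)
      omega

-- A's negative loop computes s + (bit_length(n // 129) + 7) // 8 (any sufficient fuel)
lemma loopNeg_eq : ∀ (fuel : Nat) (n : Nat) (s : Int), n ≤ fuel →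
    intsizeLoopNeg fuel (n : Int) s
      = s + (((PySem.Int.bitLength ((n / 129 : Nat) : Int) + 7) / 8 : Nat) : Int) := by
  intro fuel
  induction fuel with
  | zero =>
    intro n s hn
    rw [show n = 0 by omega]
    rw [show (0 : Nat) / 129 = 0 from rfl, bl_zero_cast]
    simp [intsizeLoopNeg]
  | succ fuel ih =>
    intro n s hn
    rw [intsizeLoopNeg]
    by_cases h : 129 ≤ n
    · rw [if_pos (show (128 : Int) < (n : Int) by exact_mod_cast (by omega : 128 < n)),
        floordiv_natCast256, ih (n / 256) _ (by omega : n / 256 ≤ fuel),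
        show n / 256 / 129 = n / 129 / 256 by
          rw [Nat.div_div_eq_div_mul, Nat.div_div_eq_div_mul, Nat.mul_comm]]
      by_cases hq : 128 ≤ n / 129
      · rw [bl_div256 hq]
        have h8 : 8 ≤ PySem.Int.bitLength ((n / 129 : Nat) : Int) := lt_bl_of_le (k := 7) (by omega)
        omega
      · have hq1 : 1 ≤ n / 129 := (Nat.one_le_div_iff (by omega)).mpr h
        rw [show n / 129 / 256 = 0 from Nat.div_eq_of_lt (by omega), bl_zero_cast]
        have hbl1 : 1 ≤ PySem.Int.bitLength ((n / 129 : Nat) : Int) :=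
          lt_bl_of_le (k := 0) (by omega)
        have hbl7 : PySem.Int.bitLength ((n / 129 : Nat) : Int) ≤ 7 :=
          bl_le_of_lt (k := 7) (by omega)
        omega
    · rw [if_neg (show ¬ (128 : Int) < (n : Int) by exact_mod_cast (by omega : ¬ 128 < n)),
        show n / 129 = 0 from Nat.div_eq_of_lt (by omega), bl_zero_cast]
      omega

-- the closed forms agree outside the D_ bands and the loop count is exactly one short inside them
lemma counts (m : Nat) (h1 : 1 ≤ m) (h2 : m ≤ 2 ^ 31) :
    (if (32768 < m ∧ m < 33024) ∨ (8388608 < m ∧ m < 8454144)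
     then (PySem.Int.bitLength ((m / 129 : Nat) : Int) + 7) / 8 + 1
          = PySem.Int.bitLength ((m - 1 : Nat) : Int) / 8
     else (PySem.Int.bitLength ((m / 129 : Nat) : Int) + 7) / 8
          = PySem.Int.bitLength ((m - 1 : Nat) : Int) / 8) := by
  split
  · rename_i hD
    rcases hD with ⟨ha, hb⟩ | ⟨ha, hb⟩
    · have b1 : 7 < PySem.Int.bitLength ((m / 129 : Nat) : Int) := lt_bl_of_le (k := 7) (by omega)
      have b2 : PySem.Int.bitLength ((m / 129 : Nat) : Int) ≤ 8 := bl_le_of_lt (k := 8) (by omega)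
      have b3 : 15 < PySem.Int.bitLength ((m - 1 : Nat) : Int) := lt_bl_of_le (k := 15) (by omega)
      have b4 : PySem.Int.bitLength ((m - 1 : Nat) : Int) ≤ 16 := bl_le_of_lt (k := 16) (by omega)
      omega
    · have b1 : 15 < PySem.Int.bitLength ((m / 129 : Nat) : Int) := lt_bl_of_le (k := 15) (by omega)
      have b2 : PySem.Int.bitLength ((m / 129 : Nat) : Int) ≤ 16 := bl_le_of_lt (k := 16) (by omega)
      have b3 : 23 < PySem.Int.bitLength ((m - 1 : Nat) : Int) := lt_bl_of_le (k := 23) (by omega)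
      have b4 : PySem.Int.bitLength ((m - 1 : Nat) : Int) ≤ 24 := bl_le_of_lt (k := 24) (by omega)
      omega
  · rename_i hD
    by_cases c1 : m ≤ 128
    · rw [show m / 129 = 0 from Nat.div_eq_of_lt (by omega), bl_zero_cast]
      have b4 : PySem.Int.bitLength ((m - 1 : Nat) : Int) ≤ 7 := bl_le_of_lt (k := 7) (by omega)
      omega
    by_cases c2 : m ≤ 32768
    · have b1 : 0 < PySem.Int.bitLength ((m / 129 : Nat) : Int) := lt_bl_of_le (k := 0) (by omega)
      have b2 : PySem.Int.bitLength ((m / 129 : Nat) : Int) ≤ 8 := bl_le_of_lt (k := 8) (by omega)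
      have b3 : 7 < PySem.Int.bitLength ((m - 1 : Nat) : Int) := lt_bl_of_le (k := 7) (by omega)
      have b4 : PySem.Int.bitLength ((m - 1 : Nat) : Int) ≤ 15 := bl_le_of_lt (k := 15) (by omega)
      omega
    by_cases c3 : m ≤ 8388608
    · have hm : 33024 ≤ m := by omega
      have b1 : 8 < PySem.Int.bitLength ((m / 129 : Nat) : Int) := lt_bl_of_le (k := 8) (by omega)
      have b2 : PySem.Int.bitLength ((m / 129 : Nat) : Int) ≤ 16 := bl_le_of_lt (k := 16) (by omega)
      have b3 : 15 < PySem.Int.bitLength ((m - 1 : Nat) : Int) := lt_bl_of_le (k := 15) (by omega)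
      have b4 : PySem.Int.bitLength ((m - 1 : Nat) : Int) ≤ 23 := bl_le_of_lt (k := 23) (by omega)
      omega
    · have hm : 8454144 ≤ m := by omega
      have b1 : 16 < PySem.Int.bitLength ((m / 129 : Nat) : Int) := lt_bl_of_le (k := 16) (by omega)
      have b2 : PySem.Int.bitLength ((m / 129 : Nat) : Int) ≤ 24 := bl_le_of_lt (k := 24) (by omega)
      have b3 : 23 < PySem.Int.bitLength ((m - 1 : Nat) : Int) := lt_bl_of_le (k := 23) (by omega)
      have b4 : PySem.Int.bitLength ((m - 1 : Nat) : Int) ≤ 31 := bl_le_of_lt (k := 31) (by omega)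
      omega

lemma intsize_neg_closed (m : Nat) (hm : 1 ≤ m) :
    intsize (-(m : Int))
      = 1 + (((PySem.Int.bitLength ((m / 129 : Nat) : Int) + 7) / 8 : Nat) : Int) := by
  rw [intsize, if_pos (by omega : -(m : Int) < 0), neg_neg,
    show ((m : Int)).toNat = m from Int.toNat_natCast m]
  exact loopNeg_eq m m 1 le_rfl

lemma intsize_alt_neg_closed (m : Nat) (hm : 1 ≤ m) :
    intsize_alt (-(m : Int))
      = ((PySem.Int.bitLength ((m - 1 : Nat) : Int) / 8 : Nat) : Int) + 1 := by
  rw [intsize_alt, if_pos (by omega : -(m : Int) < 0),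
    show -(-(m : Int)) - 1 = ((m - 1 : Nat) : Int) by omega]

-- ===== VERDICT (by name: the statement is the Claim_ definition above) =====
theorem intsize_spec : Claim_unchanged_intsize := by
  intro x hdom hnD
  unfold Dom_intsize pvDomInt at hdom
  simp only [decide_eq_true_eq] at hdom
  by_cases hx : x < 0
  · obtain ⟨m, hm1, rfl⟩ : ∃ m : Nat, 1 ≤ m ∧ x = -(m : Int) :=
      ⟨(-x).toNat, by omega, by omega⟩
    rw [intsize_neg_closed m hm1, intsize_alt_neg_closed m hm1]
    unfold D_intsize at hnD
    have hcnt := counts m hm1 (by omega)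
    rw [if_neg (by omega : ¬ ((32768 < m ∧ m < 33024) ∨ (8388608 < m ∧ m < 8454144)))] at hcnt
    omega
  · obtain ⟨m, rfl⟩ : ∃ m : Nat, x = (m : Int) := ⟨x.toNat, by omega⟩
    rw [intsize, if_neg hx, intsize_alt, if_neg hx,
      show ((m : Int)).toNat = m from Int.toNat_natCast m, loopPos_eq m m 1 le_rfl]
    omega

theorem intsize_changed : Claim_changed_intsize := by
  unfold Claim_changed_intsize
  have e1 : pvDiffWitness_intsize = -((32769 : Nat) : Int) := by
    unfold pvDiffWitness_intsize
    norm_num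
  refine ⟨by decide, by decide, ?_, ?_, by decide⟩
  · rw [e1, intsize_neg_closed 32769 (by omega)]
    decide
  · rw [e1, intsize_alt_neg_closed 32769 (by omega)]
    decide

theorem intsize_tight : Claim_exact_intsize := by
  intro x hdom hD
  unfold Dom_intsize pvDomInt at hdom
  simp only [decide_eq_true_eq] at hdom
  unfold D_intsize at hD
  obtain ⟨hx, hband⟩ := hD
  obtain ⟨m, hm1, rfl⟩ : ∃ m : Nat, 1 ≤ m ∧ x = -(m : Int) :=
    ⟨(-x).toNat, by omega, by omega⟩
  rw [intsize_neg_closed m hm1, intsize_alt_neg_closed m hm1]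
  have hcnt := counts m hm1 (by omega)
  rw [if_pos (by omega : (32768 < m ∧ m < 33024) ∨ (8388608 < m ∧ m < 8454144))] at hcnt
  omega
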